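-- pv_equiv track=rewrite | github.com/rentagr/BioInf_Utilities | modules/fastq_utils.py | validate_fastq_record
-- ===== SOURCE A (Python) =====
-- VALID_NUCLEOTIDES = set("ATCGNnatcgn")
--
-- PHRED33_MIN = 33  # Minimum ASCII code for Phred+33 ('!')
--
-- PHRED33_MAX = 126  # Maximum ASCII code for Phred+126 ('~')
--
-- def validate_fastq_record(sequence: str, quality: str) -> bool:
--     """
--     Validates a FASTQ record.
--
--     Parameters
--     ----------
--     sequence : str
--         Nucleotide sequence
--     quality : str
--         Quality string in Phred+33 format
--
--     Returns
--     -------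
--     bool
--         True if the record is valid, False otherwise
--
--     Examples
--     --------
--     >>> validate_fastq_record("ATCG", "IIII")
--     True
--     >>> validate_fastq_record("ATCG", "III")  # different length
--     False
--     >>> validate_fastq_record("ATCX", "IIII")  # invalid nucleotide
--     False
--     """
--     # Check if lengths are equal
--     if len(sequence) != len(quality):
--         return False
--
--     # Check nucleotide validity
--     if not set(sequence.upper()).issubset(VALID_NUCLEOTIDES):
--         return False
--
--     # Check quality validity (Phred+33 from '!' to '~')
--     for q_char in quality:
--         if not (PHRED33_MIN <= ord(q_char) <= PHRED33_MAX):
--             return False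
--
--     return True
-- ===== SOURCE B (Python) =====
-- PHRED33_MIN = 33
--
-- PHRED33_MAX = 126
--
--
-- def validate_fastq_record(sequence: str, quality: str) -> bool:
--     """Single fused pass over zip(sequence, quality) instead of a set-subset
--     check plus a separate quality loop."""
--     if len(sequence) != len(quality):
--         return False
--     for s, q in zip(sequence, quality):
--         if s.upper() not in ("A", "T", "C", "G", "N") or not (PHRED33_MIN <= ord(q) <= PHRED33_MAX):
--             return False
--     return True
-- ===== Notes on version B (the rewrite author's own statement) =====
-- stated objective: simpler
-- what changed: Replaces A's two separate validation passes (building a set of uppercased sequence characters and testing subset of VALID_NUCLEOTIDES, then a second loop over quality) with one fused loop over zip(sequence, quality) checking each nucleotide and quality character together, dropping the set construction.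
import Mathlib
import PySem

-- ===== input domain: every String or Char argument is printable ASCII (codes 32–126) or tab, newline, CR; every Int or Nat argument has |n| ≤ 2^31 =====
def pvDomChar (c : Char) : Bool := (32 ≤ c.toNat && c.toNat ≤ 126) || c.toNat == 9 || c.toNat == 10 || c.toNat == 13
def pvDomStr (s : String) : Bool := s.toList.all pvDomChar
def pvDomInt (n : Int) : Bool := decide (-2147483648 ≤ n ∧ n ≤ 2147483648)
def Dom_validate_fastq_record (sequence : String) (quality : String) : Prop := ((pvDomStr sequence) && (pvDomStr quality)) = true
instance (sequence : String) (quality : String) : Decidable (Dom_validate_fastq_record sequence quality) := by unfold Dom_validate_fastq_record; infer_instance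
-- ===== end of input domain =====

-- B fuses A's set-subset pass and quality loop into one loop over zip(sequence, quality) (objective: simpler; return value only).

-- ===== PORT A =====
def pvVALID_NUCLEOTIDES : PySem.Set Char := PySem.Set.ofList "ATCGNnatcgn".toList

-- the 'for q_char in quality' loop of A
def pvQualLoop : List Char → Bool
  | [] => true
  | c :: rest => if ¬ (33 ≤ c.toNat ∧ c.toNat ≤ 126) then false else pvQualLoop rest

def validate_fastq_record (sequence : String) (quality : String) : Bool :=
  if PySem.Str.len sequence ≠ PySem.Str.len quality then false
  else if ¬ (PySem.Set.issubset (PySem.Set.ofList (PySem.Chars.upper sequence.toList)) pvVALID_NUCLEOTIDES) then false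
  else pvQualLoop quality.toList

-- ===== PORT B =====
-- the 'for s, q in zip(sequence, quality)' loop of B
def pvZipLoop : List (Char × Char) → Bool
  | [] => true
  | (s, q) :: rest =>
    if ¬ (PySem.Chars.upperChar s ∈ (['A', 'T', 'C', 'G', 'N'] : List Char)) ∨
       ¬ (33 ≤ q.toNat ∧ q.toNat ≤ 126) then false
    else pvZipLoop rest

def validate_fastq_record_alt (sequence : String) (quality : String) : Bool :=
  if PySem.Str.len sequence ≠ PySem.Str.len quality then false
  else pvZipLoop (sequence.toList.zip quality.toList)

-- ===== PRECONDITION & SPEC =====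
def Spec_validate_fastq_record (sequence : String) (quality : String) (out : Bool) : Prop := out = validate_fastq_record_alt sequence quality
instance (sequence : String) (quality : String) (out : Bool) : Decidable (Spec_validate_fastq_record sequence quality out) := by unfold Spec_validate_fastq_record; infer_instance

-- ===== CLAIM (what is proved, stated in full; the proofs are below) =====
def Claim_equal_validate_fastq_record : Prop := ∀ (sequence : String) (quality : String), Dom_validate_fastq_record sequence quality → Spec_validate_fastq_record sequence quality (validate_fastq_record sequence quality)

-- ===== LEMMAS AND PROOFS =====

def pvSeqOk (c : Char) : Bool := decide (PySem.Chars.upperChar c ∈ (['A', 'T', 'C', 'G', 'N'] : List Char))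
def pvQualOk (c : Char) : Bool := decide (33 ≤ c.toNat ∧ c.toNat ≤ 126)

theorem pvQualLoop_eq_all (l : List Char) : pvQualLoop l = l.all pvQualOk := by
  induction l with
  | nil => rfl
  | cons c rest ih =>
    by_cases h : 33 ≤ c.toNat ∧ c.toNat ≤ 126 <;>
      simp [pvQualLoop, pvQualOk, h, ih]

theorem pvZipLoop_eq_all (xs : List Char) (ys : List Char) (h : xs.length = ys.length) :
    pvZipLoop (xs.zip ys) = (xs.all pvSeqOk && ys.all pvQualOk) := by
  induction xs generalizing ys with
  | nil =>
    cases ys with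
    | nil => rfl
    | cons y ys => simp at h
  | cons x xs ih =>
    cases ys with
    | nil => simp at h
    | cons y ys =>
      simp only [List.length_cons, Nat.add_right_cancel_iff] at h
      by_cases hs : PySem.Chars.upperChar x ∈ (['A', 'T', 'C', 'G', 'N'] : List Char) <;>
        by_cases hq : 33 ≤ y.toNat ∧ y.toNat ≤ 126 <;>
          simp [pvZipLoop, pvSeqOk, pvQualOk, hs, hq, ih ys h]

theorem pvToNat_ofNat (n : Nat) (h : n < 55296) : (Char.ofNat n).toNat = n := by
  unfold Char.ofNat Char.ofNatAux
  split
  · rfl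
  · exact absurd (Or.inl h) ‹_›

theorem pvIslower_iff (c : Char) : PySem.Chars.islower c = true ↔ (97 ≤ c.toNat ∧ c.toNat ≤ 122) := by
  simp only [PySem.Chars.islower, Bool.and_eq_true, decide_eq_true_eq, Char.le_def,
    UInt32.le_iff_toNat_le, Char.toNat_val]
  have h1 : 'a'.toNat = 97 := rfl
  have h2 : 'z'.toNat = 122 := rfl
  omega

-- c.upper() is never a lowercase ASCII letter
theorem pvUpperChar_not_lower (c : Char) :
    ¬ (97 ≤ (PySem.Chars.upperChar c).toNat ∧ (PySem.Chars.upperChar c).toNat ≤ 122) := by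
  unfold PySem.Chars.upperChar
  by_cases h : PySem.Chars.islower c = true
  · rw [if_pos h]
    rw [pvIslower_iff] at h
    rw [pvToNat_ofNat _ (by omega)]
    omega
  · rw [if_neg h]
    rw [pvIslower_iff] at h
    omega

-- membership in the full mixed-case alphabet equals membership in the uppercase one, for uppercased chars
theorem pvMem_big_iff (c : Char) :
    (PySem.Chars.upperChar c ∈ "ATCGNnatcgn".toList) ↔
      PySem.Chars.upperChar c ∈ (['A', 'T', 'C', 'G', 'N'] : List Char) := by
  have hnl := pvUpperChar_not_lower c
  have hbig : "ATCGNnatcgn".toList = ['A','T','C','G','N','n','a','t','c','g','n'] := rfl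
  rw [hbig]
  constructor
  · intro h
    simp only [List.mem_cons, List.not_mem_nil, or_false] at h ⊢
    rcases h with h|h|h|h|h|h|h|h|h|h|h <;>
      first
        | tauto
        | (exfalso; apply hnl; rw [h]; decide)
  · intro h
    simp only [List.mem_cons, List.not_mem_nil, or_false] at h ⊢
    tauto

theorem pvSubset_eq_all (l : List Char) :
    PySem.Set.issubset (PySem.Set.ofList (PySem.Chars.upper l)) pvVALID_NUCLEOTIDES = l.all pvSeqOk := by
  rw [Bool.eq_iff_iff, PySem.Set.issubset_iff, List.all_eq_true]
  constructor
  · intro h c hc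
    have := h (PySem.Chars.upperChar c) (by
      rw [PySem.Set.mem_ofList]
      exact List.mem_map_of_mem hc)
    unfold pvVALID_NUCLEOTIDES at this
    rw [PySem.Set.mem_ofList, pvMem_big_iff] at this
    simpa [pvSeqOk] using this
  · intro h x hx
    rw [PySem.Set.mem_ofList] at hx
    simp only [PySem.Chars.upper, List.mem_map] at hx
    obtain ⟨c, hc, rfl⟩ := hx
    have := h c hc
    simp only [pvSeqOk, decide_eq_true_eq] at this
    unfold pvVALID_NUCLEOTIDES
    rw [PySem.Set.mem_ofList, pvMem_big_iff]
    exact this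

-- ===== VERDICT (by name: the statement is the Claim_ definition above) =====
theorem validate_fastq_record_spec : Claim_equal_validate_fastq_record := by
  intro s q _
  unfold Spec_validate_fastq_record validate_fastq_record validate_fastq_record_alt
  by_cases hc : PySem.Str.len s = PySem.Str.len q
  · have hne : ¬ (PySem.Str.len s ≠ PySem.Str.len q) := by simpa using hc
    have hlen : s.toList.length = q.toList.length := by
      rw [PySem.Str.len_eq, PySem.Str.len_eq] at hc
      exact_mod_cast hc
    rw [if_neg hne, if_neg hne, pvZipLoop_eq_all _ _ hlen, pvSubset_eq_all]
    by_cases ha : s.toList.all pvSeqOk = true <;>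
      simp [ha, pvQualLoop_eq_all]
  · rw [if_pos hc, if_pos hc]
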